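-- pv_equiv track=rewrite | github.com/DoctorDalek1963/WhatsApp-HTML-Formatter | formatter_functions.py | replace_tags
-- ===== SOURCE A (Python) =====
-- formatDict = {"_": "em", "*": "strong", "~": "del"}  # Dict of format chars with their HTML tags
--
-- def format_to_html(string: str) -> str:
--     """Replace format characters with their HTML tags."""
--     first_tag = True
--     list_string = list(string)
--
--     for char, tag in formatDict.items():
--         if char in string and string.count(char) % 2 == 0:
--             for x, letter in enumerate(list_string):
--                 if letter == char:
--                     if first_tag:
--                         list_string[x] = f"<{tag}>"
--                         first_tag = False
--                     else:
--                         list_string[x] = f"</{tag}>"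
--                         first_tag = True
--
--     return "".join(list_string)
--
-- def replace_tags(string: str) -> str:
--     """Replace format characters with HTML tags in string."""
--     first_tag = True
--     if "```" in string:
--         string = string.replace("```", "<code>")
--         list_string = list(string)
--         for x, letter in enumerate(list_string):
--             if letter == "<":
--                 if first_tag:
--                     first_tag = False
--                 else:
--                     list_string[x] = "</"
--                     first_tag = True
--
--         string = "".join(list_string)
--     else:
--         string = format_to_html(string)
--
--     return string
-- ===== SOURCE B (Python) =====
-- formatDict = {"_": "em", "*": "strong", "~": "del"}
--
--
-- def replace_tags(string: str) -> str:
--     """Replace format characters with HTML tags in string."""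
--     if "```" in string:
--         parts = string.replace("```", "<code>").split("<")
--         return parts[0] + "".join(
--             ("<" if i % 2 == 0 else "</") + p for i, p in enumerate(parts[1:]))
--     result = string
--     for char, tag in formatDict.items():
--         if char in string and string.count(char) % 2 == 0:
--             parts = result.split(char)
--             result = parts[0] + "".join(
--                 (("<%s>" % tag) if i % 2 == 0 else ("</%s>" % tag)) + p
--                 for i, p in enumerate(parts[1:]))
--     return result
-- ===== Notes on version B (the rewrite author's own statement) =====
-- stated objective: simpler
-- what changed: Replaces A's convert-to-char-list, enumerate-and-mutate-with-a-toggle-flag passes by split/join reconstruction: split on the format char (or on '<' in the code branch) and rejoin the pieces interleaving open/close tags by index parity, with the same even-count guard evaluated on the original string.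
import Mathlib
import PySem

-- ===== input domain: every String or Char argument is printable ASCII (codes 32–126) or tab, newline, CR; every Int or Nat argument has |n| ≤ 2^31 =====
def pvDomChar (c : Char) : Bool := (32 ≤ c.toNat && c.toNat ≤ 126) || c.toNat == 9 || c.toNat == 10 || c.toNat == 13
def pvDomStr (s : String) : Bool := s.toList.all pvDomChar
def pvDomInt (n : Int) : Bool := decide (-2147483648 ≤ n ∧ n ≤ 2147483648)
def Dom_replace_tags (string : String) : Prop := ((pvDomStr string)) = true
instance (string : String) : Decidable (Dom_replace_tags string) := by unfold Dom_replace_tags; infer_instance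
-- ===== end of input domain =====

-- B replaces A's list-index mutation with a toggle flag by split/join reconstruction
-- (split on the format char, rejoin interleaving open/close tags by index parity); objective: simpler.

-- module constant formatDict, shared by both ports
def pvFmtItems : List (List Char × List Char) :=
  [(['_'], ['e', 'm']), (['*'], ['s', 't', 'r', 'o', 'n', 'g']), (['~'], ['d', 'e', 'l'])]

-- ===== PORT A =====
-- format_to_html: list(string), three enumerate-passes replacing format chars in place,
-- threading first_tag; ported as folds that rebuild the list (mutations are only at the
-- position being visited, so the pass reads the list as it was when the pass started).
def format_to_html_chars (s : List Char) : List Char :=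
  (pvFmtItems.foldl
    (fun (st : Bool × List (List Char)) it =>
      if PySem.Chars.isIn it.1 s && (PySem.Chars.count s it.1 % 2 == 0) then
        st.2.foldl
          (fun (st2 : Bool × List (List Char)) letter =>
            if letter = it.1 then
              if st2.1 then (false, st2.2 ++ [('<' :: (it.2 ++ ['>']))])
              else (true, st2.2 ++ [('<' :: '/' :: (it.2 ++ ['>']))])
            else (st2.1, st2.2 ++ [letter]))
          (st.1, [])
      else st)
    (true, s.map (fun ch => [ch]))).2.flatten

def replace_tags (string : String) : String :=
  let s := string.toList
  if PySem.Chars.isIn ['`', '`', '`'] s then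
    let s1 := PySem.Chars.replace s ['`', '`', '`'] ['<', 'c', 'o', 'd', 'e', '>']
    String.mk
      (((s1.map (fun ch => [ch])).foldl
        (fun (st : Bool × List (List Char)) letter =>
          if letter = ['<'] then
            if st.1 then (false, st.2 ++ [letter]) else (true, st.2 ++ [['<', '/']])
          else (st.1, st.2 ++ [letter]))
        (true, [])).2.flatten)
  else String.mk (format_to_html_chars s)

-- ===== PORT B =====
-- stitch(parts, opn, cls): parts[0] + "".join((opn if i % 2 == 0 else cls) + p for i, p in enumerate(parts[1:]))
def pvStitch (opn cls : List Char) (parts : List (List Char)) : List Char :=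
  parts.headI ++
    PySem.Chars.join []
      ((PySem.List.enumerate parts.tail).map
        (fun ip => (if PySem.Int.mod ip.1 2 == 0 then opn else cls) ++ ip.2))

def replace_tags_alt (string : String) : String :=
  let s := string.toList
  if PySem.Chars.isIn ['`', '`', '`'] s then
    String.mk
      (pvStitch ['<'] ['<', '/']
        (PySem.Chars.splitOn
          (PySem.Chars.replace s ['`', '`', '`'] ['<', 'c', 'o', 'd', 'e', '>']) ['<']))
  else
    String.mk
      (pvFmtItems.foldl
        (fun res it =>
          if PySem.Chars.isIn it.1 s && (PySem.Chars.count s it.1 % 2 == 0) then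
            pvStitch ('<' :: (it.2 ++ ['>'])) ('<' :: '/' :: (it.2 ++ ['>']))
              (PySem.Chars.splitOn res it.1)
          else res)
        s)

-- ===== PRECONDITION & SPEC =====
def Spec_replace_tags (string : String) (out : String) : Prop := out = replace_tags_alt string
instance (string : String) (out : String) : Decidable (Spec_replace_tags string out) := by unfold Spec_replace_tags; infer_instance

-- ===== CLAIM (what is proved, stated in full; the proofs are below) =====
def Claim_equal_replace_tags : Prop := ∀ (string : String), Dom_replace_tags string → Spec_replace_tags string (replace_tags string)

-- ===== LEMMAS AND PROOFS =====

def pvSplit (c : Char) : List Char → List (List Char)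
  | [] => [[]]
  | x :: xs =>
    if x = c then [] :: pvSplit c xs
    else
      match pvSplit c xs with
      | [] => [[x]]
      | h :: t => (x :: h) :: t

def pvConsApp (x : List Char) : List (List Char) → List (List Char)
  | [] => [x]
  | h :: t => (x ++ h) :: t

def pvToggle (c : Char) (opn cls : List Char) : Bool → List (List Char) → List (List Char)
  | _, [] => []
  | b, sN :: rest =>
    (if sN = [c] then (if b then opn else cls) else sN) ::
      pvToggle c opn cls (if sN = [c] then !b else b) rest

def pvInterleave (opn cls : List Char) : Bool → List (List Char) → List Char
  | _, [] => []
  | _, [p] => p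
  | b, p :: q :: ps => p ++ (if b then opn else cls) ++ pvInterleave opn cls (!b) (q :: ps)

def pvTagcat (opn cls : List Char) : Bool → List (List Char) → List Char
  | _, [] => []
  | b, p :: ps => (if b then opn else cls) ++ p ++ pvTagcat opn cls (!b) ps

def pvFlip (b : Bool) (n : Nat) : Bool := if n % 2 = 0 then b else !b

def pvGood (c : Char) (L : List (List Char)) : Prop := ∀ sN ∈ L, c ∈ sN → sN = [c]

lemma pvSplit_ne_nil (c : Char) (l : List Char) : pvSplit c l ≠ [] := by
  cases l with
  | nil => simp [pvSplit]
  | cons x xs =>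
    simp only [pvSplit]
    split
    · simp
    · split <;> simp

lemma pvFoldl_toggle (c : Char) (opn cls : List Char) (L : List (List Char))
    (b : Bool) (acc : List (List Char)) :
    L.foldl
      (fun (st2 : Bool × List (List Char)) letter =>
        if letter = [c] then
          if st2.1 then (false, st2.2 ++ [opn]) else (true, st2.2 ++ [cls])
        else (st2.1, st2.2 ++ [letter]))
      (b, acc)
    = (pvFlip b (L.count [c]), acc ++ pvToggle c opn cls b L) := by
  induction L generalizing b acc with
  | nil => simp [pvFlip, pvToggle]
  | cons sN rest ih =>
    simp only [List.foldl_cons]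
    by_cases hs : sN = [c]
    · subst hs
      cases b <;>
        simp [ih, pvToggle, pvFlip, List.count_cons, Nat.add_mod] <;>
        rcases Nat.mod_two_eq_zero_or_one (List.count [c] rest) with h | h <;> simp [h]
    · simp [hs, ih, pvToggle, pvFlip, List.count_cons, Ne.symm]


lemma pvSplit_append_not_mem (c : Char) (sN t : List Char) (h : c ∉ sN) :
    pvSplit c (sN ++ t) = pvConsApp sN (pvSplit c t) := by
  induction sN with
  | nil =>
    cases hps : pvSplit c t with
    | nil => exact absurd hps (pvSplit_ne_nil c t)
    | cons hh tt => simp [pvConsApp, hps]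
  | cons x xs ih =>
    have hx : ¬ x = c := by simp at h; exact fun h' => h.1 h'.symm
    have h' : c ∉ xs := by simp at h; exact h.2
    simp only [List.cons_append, pvSplit, if_neg hx, ih h']
    cases hpt : pvSplit c t with
    | nil => exact absurd hpt (pvSplit_ne_nil c t)
    | cons h2 t2 => simp [pvConsApp]

lemma pvInterleave_consApp (opn cls : List Char) (b : Bool) (sN : List Char)
    (ps : List (List Char)) (h : ps ≠ []) :
    pvInterleave opn cls b (pvConsApp sN ps) = sN ++ pvInterleave opn cls b ps := by
  cases ps with
  | nil => exact absurd rfl h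
  | cons p t =>
    cases t with
    | nil => simp [pvConsApp, pvInterleave]
    | cons q u => simp [pvConsApp, pvInterleave]

lemma pvToggle_flatten (c : Char) (opn cls : List Char) (L : List (List Char))
    (hG : pvGood c L) (b : Bool) :
    (pvToggle c opn cls b L).flatten = pvInterleave opn cls b (pvSplit c L.flatten) := by
  induction L generalizing b with
  | nil => simp [pvToggle, pvSplit, pvInterleave]
  | cons sN rest ih =>
    have hGr : pvGood c rest := fun s hs => hG s (List.mem_cons_of_mem _ hs)
    by_cases hs : sN = [c]
    · subst hs
      simp only [pvToggle, if_pos rfl, List.flatten_cons, List.cons_append,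
        List.nil_append, pvSplit, if_pos rfl]
      cases hps : pvSplit c rest.flatten with
      | nil => exact absurd hps (pvSplit_ne_nil c _)
      | cons hh tt =>
        rw [ih hGr, hps]
        simp [pvInterleave]
    · have hnc : c ∉ sN := fun hc => hs (hG sN (List.mem_cons_self) hc)
      simp only [pvToggle, if_neg hs, List.flatten_cons]
      rw [pvSplit_append_not_mem c sN rest.flatten hnc,
        pvInterleave_consApp opn cls b sN _ (pvSplit_ne_nil c _), ih hGr]

lemma pvInterleave_eq_tagcat (opn cls : List Char) (b : Bool) (p : List Char)
    (ps : List (List Char)) :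
    pvInterleave opn cls b (p :: ps) = p ++ pvTagcat opn cls b ps := by
  induction ps generalizing b p with
  | nil => simp [pvInterleave, pvTagcat]
  | cons q u ih => simp [pvInterleave, pvTagcat, ih]

lemma pvEnum_tagcat (opn cls : List Char) (ps : List (List Char)) (n : Nat) :
    PySem.Chars.join []
      ((PySem.List.enumerate ps (n : Int)).map
        (fun ip => (if PySem.Int.mod ip.1 2 == 0 then opn else cls) ++ ip.2))
    = pvTagcat opn cls (decide (n % 2 = 0)) ps := by
  induction ps generalizing n with
  | nil => simp [PySem.List.enumerate_nil, pvTagcat, PySem.Chars.join, List.intercalate]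
  | cons p u ih =>
    rw [PySem.List.enumerate_cons]
    have hmod : (PySem.Int.mod (n : Int) 2 == 0) = decide (n % 2 = 0) := by
      rw [PySem.Int.mod_eq_emod_of_pos (by omega : (0:Int) < 2)]
      rcases Nat.mod_two_eq_zero_or_one n with h | h <;> simp [h] <;> omega
    have hstep : ((n : Int) + 1) = ((n + 1 : Nat) : Int) := by push_cast; ring
    simp only [List.map_cons, hmod, hstep]
    have hjoin : ∀ (a : List Char) (l : List (List Char)),
        PySem.Chars.join [] (a :: l) = a ++ PySem.Chars.join [] l := by
      intro a l
      cases l <;> simp [PySem.Chars.join, List.intercalate]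
    rw [hjoin, ih (n + 1)]
    have hflip : decide ((n + 1) % 2 = 0) = !decide (n % 2 = 0) := by
      rcases Nat.mod_two_eq_zero_or_one n with h | h <;> simp [Nat.add_mod, h]
    rw [hflip]
    simp [pvTagcat]

lemma pvStitch_eq (opn cls : List Char) (p : List Char) (ps : List (List Char)) :
    pvStitch opn cls (p :: ps) = pvInterleave opn cls true (p :: ps) := by
  have h := pvEnum_tagcat opn cls ps 0
  simp only [Nat.cast_zero] at h
  rw [pvStitch]
  simp only [List.headI, List.tail_cons]
  rw [h, pvInterleave_eq_tagcat]
  simp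

lemma pvCount_flatten_toggle (c c' : Char) (opn cls : List Char) (b : Bool)
    (L : List (List Char)) (hne : c' ≠ c) (ho : c' ∉ opn) (hc : c' ∉ cls) :
    List.count c' (pvToggle c opn cls b L).flatten = List.count c' L.flatten := by
  induction L generalizing b with
  | nil => simp [pvToggle]
  | cons sN rest ih =>
    by_cases hs : sN = [c]
    · subst hs
      have h1 : List.count c' (if b then opn else cls) = 0 := by
        cases b <;> simp [List.count_eq_zero, ho, hc]
      have h2 : List.count c' ([c] : List Char) = 0 :=
        List.count_eq_zero.mpr (by simp [hne])
      have h3 : (c == c') = false := by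
        simp only [beq_eq_false_iff_ne]; exact fun h' => hne h'.symm
      simp [pvToggle, List.count_append, ih, h1, h2, List.count_cons, h3]
    · simp only [pvToggle, if_neg hs, List.flatten_cons, List.count_append, ih]

lemma pvGood_toggle (c c' : Char) (opn cls : List Char) (b : Bool)
    (L : List (List Char)) (hG : pvGood c' L) (ho : c' ∉ opn) (hc : c' ∉ cls) :
    pvGood c' (pvToggle c opn cls b L) := by
  induction L generalizing b with
  | nil => intro s hs; simp [pvToggle] at hs
  | cons sN rest ih =>
    intro s hs hcs
    simp only [pvToggle, List.mem_cons] at hs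
    rcases hs with hs | hs
    · subst hs
      by_cases h1 : sN = [c]
      · rw [if_pos h1] at hcs ⊢
        cases b
        · simp only [Bool.false_eq_true, if_false] at hcs ⊢
          exact absurd hcs hc
        · simp only [if_true] at hcs ⊢
          exact absurd hcs ho
      · rw [if_neg h1] at hcs ⊢
        exact hG sN List.mem_cons_self hcs
    · exact ih (if sN = [c] then !b else b) (fun t ht => hG t (List.mem_cons_of_mem _ ht)) s hs hcs

lemma pvGood_count (c : Char) (L : List (List Char)) (hG : pvGood c L) :
    L.count [c] = List.count c L.flatten := by
  induction L with
  | nil => simp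
  | cons sN rest ih =>
    have ih' := ih (fun t ht => hG t (List.mem_cons_of_mem _ ht))
    by_cases hs : sN = [c]
    · subst hs
      simp [List.count_cons, List.count_append, ih']
    · have hnc : c ∉ sN := fun hc => hs (hG sN List.mem_cons_self hc)
      simp [List.count_cons, List.count_append, ih', hs,
        List.count_eq_zero.mpr hnc]

lemma pvGood_singletons (c : Char) (l : List Char) :
    pvGood c (l.map (fun ch => [ch])) := by
  intro s hs hcs
  simp only [List.mem_map] at hs
  obtain ⟨ch, _, rfl⟩ := hs
  simp at hcs
  simp [hcs]

lemma pvFlatten_singletons (l : List Char) :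
    (l.map (fun ch => [ch])).flatten = l := by
  induction l with
  | nil => simp
  | cons x xs ih => simp [ih]

lemma pvSplitOn_go (c : Char) :
    ∀ (fuel : Nat) (l cur : List Char) (acc : List (List Char)), l.length ≤ fuel →
    PySem.Chars.splitOn.go [c] fuel l cur acc
      = acc.reverse ++ pvConsApp cur.reverse (pvSplit c l) := by
  intro fuel
  induction fuel with
  | zero =>
    intro l cur acc h
    have : l = [] := by simpa using h
    subst this
    simp [PySem.Chars.splitOn.go, pvSplit, pvConsApp]
  | succ fuel ih =>
    intro l cur acc h
    cases l with
    | nil => simp [PySem.Chars.splitOn.go, pvSplit, pvConsApp]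
    | cons x xs =>
      simp only [PySem.Chars.splitOn.go]
      by_cases hx : x = c
      · subst hx
        simp only [List.isPrefixOf, BEq.rfl, Bool.and_true, if_pos]
        rw [show List.drop ([x] : List Char).length (x :: xs) = xs by simp]
        rw [ih xs [] (cur.reverse :: acc) (by simpa using h)]
        obtain ⟨hh, t, hps⟩ : ∃ hh t, pvSplit x xs = hh :: t := by
          cases hps : pvSplit x xs with
          | nil => exact absurd hps (pvSplit_ne_nil x xs)
          | cons a b => exact ⟨a, b, rfl⟩
        simp [pvSplit, hps, pvConsApp]
      · rw [show ([c]).isPrefixOf (x :: xs) = false by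
            simp [List.isPrefixOf]; exact fun h' => hx h'.symm]
        simp only [Bool.false_eq_true, if_neg, if_false]
        rw [ih xs (x :: cur) acc (by simpa using h)]
        cases hps : pvSplit c xs with
        | nil => exact absurd hps (pvSplit_ne_nil c xs)
        | cons hh t => simp [pvSplit, hx, hps, pvConsApp]

lemma pvSplitOn_single (c : Char) (l : List Char) :
    PySem.Chars.splitOn l [c] = pvSplit c l := by
  rw [PySem.Chars.splitOn, pvSplitOn_go c (l.length + 1) l [] [] (by omega)]
  cases hps : pvSplit c l with
  | nil => exact absurd hps (pvSplit_ne_nil c l)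
  | cons hh t => simp [pvConsApp]

lemma pvCount_go (c : Char) :
    ∀ (fuel : Nat) (l : List Char) (acc : Nat), l.length ≤ fuel →
    PySem.Chars.count.go [c] fuel l acc = acc + List.count c l := by
  intro fuel
  induction fuel with
  | zero =>
    intro l acc h
    have : l = [] := by simpa using h
    subst this
    simp [PySem.Chars.count.go]
  | succ fuel ih =>
    intro l acc h
    cases l with
    | nil => simp [PySem.Chars.count.go]
    | cons x xs =>
      simp only [PySem.Chars.count.go]
      by_cases hx : x = c
      · subst hx
        simp only [List.isPrefixOf, BEq.rfl, Bool.and_true, if_pos]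
        rw [show List.drop ([x] : List Char).length (x :: xs) = xs by simp]
        rw [ih xs (acc + 1) (by simpa using h)]
        simp [List.count_cons]
        omega
      · rw [show ([c]).isPrefixOf (x :: xs) = false by
            simp [List.isPrefixOf]; exact fun h' => hx h'.symm]
        simp only [Bool.false_eq_true, if_neg, if_false]
        rw [ih xs acc (by simpa using h)]
        simp [List.count_cons, hx]

lemma pvCount_single (c : Char) (l : List Char) :
    PySem.Chars.count l [c] = List.count c l := by
  rw [PySem.Chars.count]
  simp only [List.isEmpty_cons, if_neg, Bool.false_eq_true, if_false]
  have := pvCount_go c l.length l 0 (le_refl _)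
  omega

lemma pvStep_eq (c : Char) (opn cls : List Char) (s : List Char) (L : List (List Char))
    (hG : pvGood c L)
    (hcnt : List.count c L.flatten = List.count c s)
    (hguard : (PySem.Chars.count s [c] % 2 == 0) = true) :
    L.foldl
      (fun (st2 : Bool × List (List Char)) letter =>
        if letter = [c] then
          if st2.1 then (false, st2.2 ++ [opn]) else (true, st2.2 ++ [cls])
        else (st2.1, st2.2 ++ [letter]))
      (true, [])
    = (true, pvToggle c opn cls true L)
    ∧ (pvToggle c opn cls true L).flatten
        = pvStitch opn cls (PySem.Chars.splitOn L.flatten [c]) := by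
  constructor
  · rw [pvFoldl_toggle]
    have he : List.count c L.flatten % 2 = 0 := by
      rw [pvCount_single] at hguard
      simp at hguard
      omega
    rw [pvGood_count c L hG, pvFlip]
    simp [he]
  · rw [pvToggle_flatten c opn cls L hG true, pvSplitOn_single]
    cases hps : pvSplit c L.flatten with
    | nil => exact absurd hps (pvSplit_ne_nil c _)
    | cons hh tt => rw [pvStitch_eq]

def pvInv (s : List Char) (items : List (List Char × List Char))
    (L : List (List Char)) : Prop :=
  ∀ it ∈ items, ∃ c : Char, it.1 = [c] ∧ pvGood c L ∧
    List.count c L.flatten = List.count c s ∧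
    (∀ it' ∈ items,
      c ∉ ('<' :: (it'.2 ++ ['>'])) ∧ c ∉ ('<' :: '/' :: (it'.2 ++ ['>'])))

lemma pvChain (s : List Char) :
    ∀ (items : List (List Char × List Char)) (L : List (List Char)),
    pvInv s items L → (items.map (·.1)).Nodup →
    (items.foldl
      (fun (st : Bool × List (List Char)) it =>
        if PySem.Chars.isIn it.1 s && (PySem.Chars.count s it.1 % 2 == 0) then
          st.2.foldl
            (fun (st2 : Bool × List (List Char)) letter =>
              if letter = it.1 then
                if st2.1 then (false, st2.2 ++ [('<' :: (it.2 ++ ['>']))])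
                else (true, st2.2 ++ [('<' :: '/' :: (it.2 ++ ['>']))])
              else (st2.1, st2.2 ++ [letter]))
            (st.1, [])
        else st)
      (true, L)).1 = true
    ∧ (items.foldl
      (fun (st : Bool × List (List Char)) it =>
        if PySem.Chars.isIn it.1 s && (PySem.Chars.count s it.1 % 2 == 0) then
          st.2.foldl
            (fun (st2 : Bool × List (List Char)) letter =>
              if letter = it.1 then
                if st2.1 then (false, st2.2 ++ [('<' :: (it.2 ++ ['>']))])
                else (true, st2.2 ++ [('<' :: '/' :: (it.2 ++ ['>']))])
              else (st2.1, st2.2 ++ [letter]))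
            (st.1, [])
        else st)
      (true, L)).2.flatten
      = items.foldl
          (fun res it =>
            if PySem.Chars.isIn it.1 s && (PySem.Chars.count s it.1 % 2 == 0) then
              pvStitch ('<' :: (it.2 ++ ['>'])) ('<' :: '/' :: (it.2 ++ ['>']))
                (PySem.Chars.splitOn res it.1)
            else res)
          L.flatten := by
  intro items
  induction items with
  | nil => intro L _ _; simp
  | cons it rest ih =>
    intro L hinv hnd
    obtain ⟨c, hc1, hG, hcnt, hnotin⟩ := hinv it List.mem_cons_self
    by_cases hg : (PySem.Chars.isIn it.1 s
        && (PySem.Chars.count s it.1 % 2 == 0)) = true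
    · have hguard : (PySem.Chars.count s [c] % 2 == 0) = true := by
        have h' := hg
        rw [Bool.and_eq_true] at h'
        rw [← hc1]; exact h'.2
      obtain ⟨hA, hB⟩ := pvStep_eq c ('<' :: (it.2 ++ ['>']))
        ('<' :: '/' :: (it.2 ++ ['>'])) s L hG hcnt hguard
      simp only [List.foldl_cons]
      rw [if_pos hg, if_pos hg, hc1]
      rw [hA, ← hB]
      apply ih (pvToggle c ('<' :: (it.2 ++ ['>'])) ('<' :: '/' :: (it.2 ++ ['>'])) true L)
      · intro it' hit'
        obtain ⟨c', h1, h2, h3, h4⟩ := hinv it' (List.mem_cons_of_mem _ hit')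
        have hoc : c' ∉ ('<' :: (it.2 ++ ['>'])) := (h4 it List.mem_cons_self).1
        have hcc : c' ∉ ('<' :: '/' :: (it.2 ++ ['>'])) := (h4 it List.mem_cons_self).2
        have hne : c' ≠ c := by
          intro he
          subst he
          have : it.1 ∈ rest.map (·.1) := by
            rw [hc1, ← h1]
            exact List.mem_map_of_mem hit'
          exact (List.nodup_cons.mp hnd).1 this
        refine ⟨c', h1, pvGood_toggle c c' _ _ true L h2 hoc hcc, ?_, ?_⟩
        · rw [pvCount_flatten_toggle c c' _ _ true L hne hoc hcc]
          exact h3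
        · exact fun it'' hit'' => h4 it'' (List.mem_cons_of_mem _ hit'')
      · exact (List.nodup_cons.mp hnd).2
    · simp only [List.foldl_cons, hg, if_neg, Bool.false_eq_true, if_false]
      apply ih L
      · intro it' hit'
        obtain ⟨c', h1, h2, h3, h4⟩ := hinv it' (List.mem_cons_of_mem _ hit')
        exact ⟨c', h1, h2, h3, fun it'' hit'' => h4 it'' (List.mem_cons_of_mem _ hit'')⟩
      · exact (List.nodup_cons.mp hnd).2

lemma pvStitch_split (opn cls : List Char) (c : Char) (res : List Char) :
    pvStitch opn cls (PySem.Chars.splitOn res [c])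
      = pvInterleave opn cls true (pvSplit c res) := by
  rw [pvSplitOn_single]
  cases hps : pvSplit c res with
  | nil => exact absurd hps (pvSplit_ne_nil c res)
  | cons hh tt => rw [pvStitch_eq]

-- ===== VERDICT (by name: the statement is the Claim_ definition above) =====
theorem replace_tags_spec : Claim_equal_replace_tags := by
  intro string _
  unfold Spec_replace_tags
  rw [replace_tags, replace_tags_alt]
  by_cases hin : PySem.Chars.isIn ['`', '`', '`'] string.toList = true
  · simp only [hin, if_pos]
    apply congrArg String.mk
    set s1 := PySem.Chars.replace string.toList ['`', '`', '`']
      ['<', 'c', 'o', 'd', 'e', '>'] with hs1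
    have hcongr :
        (s1.map (fun ch => [ch])).foldl
          (fun (st : Bool × List (List Char)) letter =>
            if letter = ['<'] then
              if st.1 then (false, st.2 ++ [letter]) else (true, st.2 ++ [['<', '/']])
            else (st.1, st.2 ++ [letter]))
          (true, [])
        = (s1.map (fun ch => [ch])).foldl
          (fun (st2 : Bool × List (List Char)) letter =>
            if letter = [('<' : Char)] then
              if st2.1 then (false, st2.2 ++ [[('<' : Char)]])
              else (true, st2.2 ++ [['<', '/']])
            else (st2.1, st2.2 ++ [letter]))
          (true, []) := by
      apply PySem.List.foldl_congr_mem
      intro acc x _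
      by_cases hx : x = [('<' : Char)]
      · subst hx; rfl
      · simp only [if_neg hx]
    rw [hcongr]
    rw [pvFoldl_toggle]
    simp only [List.nil_append]
    rw [pvToggle_flatten '<' [('<' : Char)] ['<', '/'] _ (pvGood_singletons '<' s1) true]
    rw [pvFlatten_singletons]
    rw [pvStitch_split]
  · simp only [hin, Bool.false_eq_true, if_false]
    apply congrArg String.mk
    rw [format_to_html_chars]
    have hinv : pvInv string.toList pvFmtItems
        (string.toList.map (fun ch => [ch])) := by
      intro it hit
      simp only [pvFmtItems, List.mem_cons, List.not_mem_nil, or_false] at hit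
      rcases hit with h | h | h <;> subst h
      · exact ⟨'_', rfl, pvGood_singletons _ _,
          by rw [pvFlatten_singletons], by decide⟩
      · exact ⟨'*', rfl, pvGood_singletons _ _,
          by rw [pvFlatten_singletons], by decide⟩
      · exact ⟨'~', rfl, pvGood_singletons _ _,
          by rw [pvFlatten_singletons], by decide⟩
    have h := (pvChain string.toList pvFmtItems
      (string.toList.map (fun ch => [ch])) hinv (by decide)).2
    rw [pvFlatten_singletons] at h
    exact h
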